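-- pv_equiv track=rewrite | github.com/sixbrigands/tokenizer | tokenizer.py | is_initialism
-- ===== SOURCE A (Python) =====
-- def is_initialism(string):
--     dot_check = False
--     if len(string) > 3:
--         for v in string:
--             if not dot_check and v.isalpha():
--                 dot_check = not dot_check
--                 continue
--             if dot_check and v == '.':
--                 dot_check = not dot_check
--                 continue
--             else:
--                 return False
--         if dot_check == False:
--             return True
--     return False
-- ===== SOURCE B (Python) =====
-- def is_initialism(string):
--     if len(string) <= 3 or len(string) % 2 != 0:
--         return False
--     return (all(c.isalpha() for c in string[::2])
--             and all(c == '.' for c in string[1::2]))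
-- ===== Notes on version B (the rewrite author's own statement) =====
-- stated objective: idiomatic
-- what changed: Replaces A's toggling boolean state machine (one interleaved pass with early returns) by a length/parity guard plus two parity-slice passes: even positions must be letters, odd positions dots.
import Mathlib
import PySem

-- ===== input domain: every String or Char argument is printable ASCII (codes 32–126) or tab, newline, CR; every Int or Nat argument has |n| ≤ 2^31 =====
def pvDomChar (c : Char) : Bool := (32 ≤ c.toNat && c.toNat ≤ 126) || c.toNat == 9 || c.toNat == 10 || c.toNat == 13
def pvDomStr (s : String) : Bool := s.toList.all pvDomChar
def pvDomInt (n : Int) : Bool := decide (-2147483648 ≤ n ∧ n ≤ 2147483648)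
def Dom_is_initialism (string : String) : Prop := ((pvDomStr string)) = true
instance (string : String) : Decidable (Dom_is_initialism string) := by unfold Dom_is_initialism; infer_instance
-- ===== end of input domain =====

-- B replaces A's toggling boolean state machine by a length/parity guard plus two
-- parity-slice passes (even positions letters, odd positions dots); same cost.


-- ===== PORT A =====
-- A's loop with the toggling `dot_check` flag and its early returns; the [] case is
-- A's post-loop `if dot_check == False: return True` / fall-through `return False`.
def isInitLoop : List Char → Bool → Bool
  | [], dc => !dc
  | v :: rest, dc =>
    if !dc && PySem.Chars.isalpha v then isInitLoop rest (!dc)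
    else if dc && (v == '.') then isInitLoop rest (!dc)
    else false

def is_initialism (string : String) : Bool :=
  if 3 < string.toList.length then isInitLoop string.toList false else false

-- ===== PORT B =====
def is_initialism_alt (string : String) : Bool :=
  let cs := string.toList
  if cs.length ≤ 3 || cs.length % 2 != 0 then false
  else
    ((PySem.List.slice? cs none none 2).getD []).all PySem.Chars.isalpha &&
    ((PySem.List.slice? cs (some 1) none 2).getD []).all (· == '.')

-- ===== PRECONDITION & SPEC =====
def Spec_is_initialism (string : String) (out : Bool) : Prop := out = is_initialism_alt string
instance (string : String) (out : Bool) : Decidable (Spec_is_initialism string out) := by unfold Spec_is_initialism; infer_instance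

-- ===== CLAIM (what is proved, stated in full; the proofs are below) =====
def Claim_equal_is_initialism : Prop := ∀ (string : String), Dom_is_initialism string → Spec_is_initialism string (is_initialism string)

-- ===== LEMMAS AND PROOFS =====

/-- The elements of `l` at even positions. -/
def pvEvens : List Char → List Char
  | [] => []
  | [x] => [x]
  | x :: _ :: l => x :: pvEvens l

/-- The elements of `l` at odd positions. -/
def pvOdds (l : List Char) : List Char := pvEvens l.tail

lemma pvEvens_cons (w : Char) (l : List Char) : pvEvens (w :: l) = w :: pvOdds l := by
  cases l <;> simp [pvEvens, pvOdds]

lemma filterMap_evens (l : List Char) :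
    List.filterMap (fun k : Nat => l[2 * k]?) (List.range ((l.length + 1) / 2)) = pvEvens l := by
  induction l using pvEvens.induct with
  | case1 => simp [pvEvens]
  | case2 x => simp [pvEvens]
  | case3 x y l ih =>
    have hdiv : ((x :: y :: l).length + 1) / 2 = (l.length + 1) / 2 + 1 := by
      simp only [List.length_cons]; omega
    rw [hdiv, List.range_succ_eq_map, List.filterMap_cons, List.filterMap_map]
    simp only [Function.comp]
    have : ∀ k : Nat, (x :: y :: l)[2 * (k + 1)]? = l[2 * k]? := by
      intro k
      have : 2 * (k + 1) = 2 * k + 1 + 1 := by omega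
      simp [this]
    simp only [this, pvEvens]
    simp [ih]

lemma slice_evens (cs : List Char) :
    (PySem.List.slice? cs none none 2).getD [] = pvEvens cs := by
  rw [← filterMap_evens]
  cases cs with
  | nil => simp [PySem.List.slice?, PySem.List.sliceIndices]
  | cons x l =>
    simp only [PySem.List.slice?, PySem.List.sliceIndices]
    norm_num
    have hcnt : (((l.length : Int) + 1 + 2 - 1) / 2).toNat = (l.length + 1 + 1) / 2 := by omega
    rw [hcnt]
    congr 1

lemma slice_odds (cs : List Char) :
    (PySem.List.slice? cs (some 1) none 2).getD [] = pvOdds cs := by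
  cases cs with
  | nil => simp [PySem.List.slice?, PySem.List.sliceIndices, pvOdds, pvEvens]
  | cons x l =>
    rw [pvOdds, List.tail_cons, ← filterMap_evens]
    simp only [PySem.List.slice?, PySem.List.sliceIndices]
    norm_num
    rcases Nat.eq_zero_or_pos l.length with h | h
    · rw [List.length_eq_zero_iff.mp h]
      norm_num
    · rw [if_pos (by exact_mod_cast h)]
      have hcnt : (((l.length : Int) + 2 - 1) / 2).toNat = (l.length + 1) / 2 := by omega
      rw [hcnt]
      congr 1
      funext k
      have hidx : ((1 : Int) + 2 * (k : Int)).toNat = 2 * k + 1 := by omega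
      rw [hidx]
      simp

/-- A's toggling loop (started with `dot_check = False`) succeeds exactly when the length
    is even, the even positions are letters and the odd positions are dots. -/
lemma isInitLoop_eq (l : List Char) :
    isInitLoop l false =
      (decide (l.length % 2 = 0) && (pvEvens l).all PySem.Chars.isalpha
        && (pvOdds l).all (· == '.')) := by
  induction l using pvEvens.induct with
  | case1 => simp [isInitLoop, pvEvens, pvOdds]
  | case2 x =>
    simp only [isInitLoop, Bool.not_false, Bool.true_and, Bool.false_and, Bool.not_true]
    cases h : PySem.Chars.isalpha x <;> simp
  | case3 x y l ih =>
    have h2 : (l.length + (1 + 1)) % 2 = l.length % 2 := by omega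
    cases ha : PySem.Chars.isalpha x <;> cases hd : (y == '.') <;>
      simp [isInitLoop, pvEvens, pvOdds, pvEvens_cons, ha, hd, ih, h2]

-- ===== VERDICT (by name: the statement is the Claim_ definition above) =====
theorem is_initialism_spec : Claim_equal_is_initialism := by
  intro s _
  unfold Spec_is_initialism is_initialism is_initialism_alt
  simp only [slice_evens, slice_odds]
  set cs := s.toList with hcs
  by_cases h4 : 3 < cs.length
  · rw [if_pos h4, isInitLoop_eq]
    have : ¬ (cs.length ≤ 3) := by omega
    simp only [this, decide_false, Bool.false_or, bne_iff_ne, ne_eq]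
    by_cases hp : cs.length % 2 = 0
    · simp [hp]
    · simp [hp]
  · rw [if_neg h4]
    have : cs.length ≤ 3 := by omega
    simp [this]
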